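-- pv_equiv track=rewrite | github.com/wude935/CS-313E | Assignment 9/Bridge.py | use_strategy_one
-- ===== SOURCE A (Python) =====
-- def strategy_one(a, b):
--     # 1. add the time it takes a and b to cross the bridge together (to safety)
--     # 2. add the time it takes a to cross the bridge (to danger)
--     return b + a
--
-- def use_strategy_one(test_case, sorted_test_case):
--     time = 0
--     if (test_case[0] > 1):
--         # loops backwards from the end of sorted_test case until there are only two elements left
--         # plugs in the largest elements of sorted_test_case as b
--         index = len(sorted_test_case) - 1
--         while index > 1:
--             # adds the result of strategy one to the total time
--             time = time + \
--                 strategy_one(sorted_test_case[0], sorted_test_case[index])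
--             index -= 1
--         # adds the time it takes for the last two people to cross the bridge (to safety)
--         time = time + sorted_test_case[1]
--     else:
--         time += sorted_test_case[0]
--     return time
-- ===== SOURCE B (Python) =====
-- def use_strategy_one(test_case, sorted_test_case):
--     if test_case[0] > 1:
--         fastest = sorted_test_case[0]
--
--         def cost(lo, hi):
--             # divide and conquer: total time for the fastest person to escort
--             # each of sorted_test_case[lo:hi] across, returning after each trip
--             if hi - lo == 1:
--                 return sorted_test_case[lo] + fastest
--             mid = (lo + hi) // 2
--             return cost(lo, mid) + cost(mid, hi)
--
--         n = len(sorted_test_case)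
--         tail = cost(2, n) if n > 2 else 0
--         return tail + sorted_test_case[1]
--     else:
--         return sorted_test_case[0]
-- ===== Notes on version B (the rewrite author's own statement) =====
-- stated objective: alternative
-- what changed: Replaces A's backwards while-loop with a decreasing index and running accumulator by a divide-and-conquer recursion: the escorted segment [2, n) is split at its midpoint, the two halves' crossing costs are computed recursively and added; no index loop or accumulator remains.
import Mathlib
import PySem

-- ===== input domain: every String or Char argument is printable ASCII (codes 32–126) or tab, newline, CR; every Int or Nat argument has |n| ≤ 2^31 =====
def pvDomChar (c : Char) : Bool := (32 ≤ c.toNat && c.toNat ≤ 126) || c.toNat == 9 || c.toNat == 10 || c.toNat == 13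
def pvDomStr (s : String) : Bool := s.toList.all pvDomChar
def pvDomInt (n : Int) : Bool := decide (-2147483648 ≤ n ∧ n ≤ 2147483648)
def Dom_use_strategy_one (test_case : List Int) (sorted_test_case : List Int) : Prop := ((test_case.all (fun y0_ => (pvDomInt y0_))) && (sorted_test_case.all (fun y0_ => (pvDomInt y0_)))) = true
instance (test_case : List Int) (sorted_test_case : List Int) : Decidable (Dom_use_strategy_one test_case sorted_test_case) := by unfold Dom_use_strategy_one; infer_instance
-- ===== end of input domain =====

-- B replaces A's backwards index loop by a divide-and-conquer recursion over the escorted segment; alternative algorithm, same cost.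

-- ===== PORT A =====
-- helper 'strategy_one(a, b) = b + a', verbatim
def strategy_one (a b : Int) : Int := b + a

-- the 'while index > 1' loop, counting the Int index down; time is the accumulator.
-- Out-of-range accesses (excluded by Pre_) are read with default 0.
def useOneLoop (s : List Int) (time : Int) : Nat → Int
  | 0 => time
  | 1 => time
  | (n+2) => useOneLoop s
      (time + strategy_one (PySem.List.pyGetD s 0 0) (PySem.List.pyGetD s ((n : Int) + 2) 0))
      (n+1)

def use_strategy_one (test_case : List Int) (sorted_test_case : List Int) : Int :=
  let time : Int := 0
  if PySem.List.pyGetD test_case 0 0 > 1 then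
    (useOneLoop sorted_test_case time (sorted_test_case.length - 1))
      + PySem.List.pyGetD sorted_test_case 1 0
  else
    time + PySem.List.pyGetD sorted_test_case 0 0

-- ===== PORT B =====
-- Source B's inner 'cost': divide and conquer over the index segment [lo, hi).
-- Python diverges on an empty segment (never reached from the call below); the
-- port returns 0 there to be total — that branch is outside every reachable call.
def costB (s : List Int) (fastest : Int) (lo hi : Nat) : Int :=
  if hi - lo = 1 then PySem.List.pyGetD s (lo : Int) 0 + fastest
  else if hi ≤ lo then 0
  else costB s fastest lo ((lo + hi) / 2) + costB s fastest ((lo + hi) / 2) hi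
termination_by hi - lo
decreasing_by all_goals omega

def use_strategy_one_alt (test_case : List Int) (sorted_test_case : List Int) : Int :=
  if PySem.List.pyGetD test_case 0 0 > 1 then
    (if 2 < sorted_test_case.length then
        costB sorted_test_case (PySem.List.pyGetD sorted_test_case 0 0) 2 sorted_test_case.length
      else 0)
      + PySem.List.pyGetD sorted_test_case 1 0
  else
    PySem.List.pyGetD sorted_test_case 0 0

-- ===== PRECONDITION & SPEC =====
-- Pre_ excludes exactly the inputs where Python A raises IndexError (empty test_case,
-- or sorted_test_case too short for the taken branch); B raises there too.
def Pre_use_strategy_one (test_case : List Int) (sorted_test_case : List Int) : Prop :=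
  test_case ≠ [] ∧
    (if 1 < test_case.headI then 2 ≤ sorted_test_case.length else sorted_test_case ≠ [])
instance (test_case : List Int) (sorted_test_case : List Int) : Decidable (Pre_use_strategy_one test_case sorted_test_case) := by unfold Pre_use_strategy_one; infer_instance

def pvWitness_use_strategy_one : List Int × List Int := ([2, 3], [2, 3])

def Spec_use_strategy_one (test_case : List Int) (sorted_test_case : List Int) (out : Int) : Prop := out = use_strategy_one_alt test_case sorted_test_case
instance (test_case : List Int) (sorted_test_case : List Int) (out : Int) : Decidable (Spec_use_strategy_one test_case sorted_test_case out) := by unfold Spec_use_strategy_one; infer_instance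

-- ===== CLAIM (what is proved, stated in full; the proofs are below) =====
def Claim_equal_use_strategy_one : Prop := ∀ (test_case : List Int) (sorted_test_case : List Int), Dom_use_strategy_one test_case sorted_test_case → Pre_use_strategy_one test_case sorted_test_case → Spec_use_strategy_one test_case sorted_test_case (use_strategy_one test_case sorted_test_case)

-- ===== LEMMAS AND PROOFS =====

-- loop invariant for A: with all touched indices in range, the loop computes
-- time + n*s[0] + sum of s[2 .. n+1]
theorem useOneLoop_closed (s : List Int) (n : Nat) (hn : n + 2 ≤ s.length) :
    ∀ time : Int, useOneLoop s time (n + 1)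
      = time + (n : Int) * PySem.List.pyGetD s 0 0 + ((s.drop 2).take n).sum := by
  induction n with
  | zero => intro time; simp [useOneLoop]
  | succ m ih =>
    intro time
    have hm : m + 2 ≤ s.length := by omega
    have hidx : m + 2 < s.length := by omega
    have h1 : useOneLoop s time (m + 2)
        = useOneLoop s
            (time + strategy_one (PySem.List.pyGetD s 0 0)
              (PySem.List.pyGetD s ((m : Int) + 2) 0)) (m + 1) := rfl
    rw [h1, ih hm]
    have h2 : PySem.List.pyGetD s ((m : Int) + 2) 0 = s[m + 2] := by
      have : ((m : Int) + 2) = ((m + 2 : Nat) : Int) := by push_cast; ring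
      rw [this, PySem.List.pyGetD_natCast, List.getD_eq_getElem _ _ hidx]
    have h3 : ((s.drop 2).take (m + 1)).sum = ((s.drop 2).take m).sum + s[m + 2] := by
      have hlt : m < (s.drop 2).length := by simp; omega
      rw [List.take_add_one, List.sum_append,
        List.getElem?_eq_getElem hlt]
      simp [List.getElem_drop]
      congr 1
      omega
    rw [h3, strategy_one, h2]
    push_cast
    ring

-- characterisation of B's recursion: on a nonempty in-range segment it sums the
-- segment's times plus one return trip of the fastest per escorted person
theorem costB_closed (s : List Int) (f : Int) :
    ∀ (d lo hi : Nat), hi - lo = d → lo < hi → hi ≤ s.length →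
      costB s f lo hi = ((s.drop lo).take (hi - lo)).sum + ((hi - lo : Nat) : Int) * f := by
  intro d
  induction d using Nat.strong_induction_on with
  | _ d ih =>
    intro lo hi hd hlt hle
    by_cases h1 : hi - lo = 1
    · have hlo : lo < s.length := by omega
      rw [costB, if_pos h1, h1]
      have : PySem.List.pyGetD s (lo : Int) 0 = s[lo] := by
        rw [PySem.List.pyGetD_natCast, List.getD_eq_getElem _ _ hlo]
      rw [this]
      have hdrop : (s.drop lo).take 1 = [s[lo]] := by
        have hl : 0 < (s.drop lo).length := by simp; omega
        rw [List.take_one]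
        simp [List.head?_eq_getElem?, List.getElem?_eq_getElem hl]
      rw [hdrop]
      simp
    · have h2 : 2 ≤ hi - lo := by omega
      have hm1 : lo < (lo + hi) / 2 := by omega
      have hm2 : (lo + hi) / 2 < hi := by omega
      rw [costB, if_neg h1, if_neg (by omega)]
      rw [ih ((lo + hi) / 2 - lo) (by omega) lo ((lo + hi) / 2) rfl hm1 (by omega),
          ih (hi - (lo + hi) / 2) (by omega) ((lo + hi) / 2) hi rfl hm2 hle]
      have hsplit : (s.drop lo).take (hi - lo)
          = (s.drop lo).take ((lo + hi) / 2 - lo) ++ (s.drop ((lo + hi) / 2)).take (hi - (lo + hi) / 2) := by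
        have h : hi - lo = ((lo + hi) / 2 - lo) + (hi - (lo + hi) / 2) := by omega
        have hdd : (s.drop lo).drop ((lo + hi) / 2 - lo) = s.drop ((lo + hi) / 2) := by
          rw [List.drop_drop]
          congr 1
          omega
        rw [h, List.take_add, hdd]
      have hc : ((hi - lo : Nat) : Int)
          = (((lo + hi) / 2 - lo : Nat) : Int) + ((hi - (lo + hi) / 2 : Nat) : Int) := by
        have h : hi - lo = ((lo + hi) / 2 - lo) + (hi - (lo + hi) / 2) := by omega
        rw [h]
        push_cast
        ring
      rw [hsplit, List.sum_append, hc]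
      ring

-- ===== VERDICT (by name: the statement is the Claim_ definition above) =====
theorem use_strategy_one_spec : Claim_equal_use_strategy_one := by
  intro tc s _ hpre
  obtain ⟨htc, hbr⟩ := hpre
  unfold Spec_use_strategy_one use_strategy_one use_strategy_one_alt
  have h0 : PySem.List.pyGetD tc 0 0 = tc.headI := by
    cases tc with
    | nil => exact absurd rfl htc
    | cons a l => simp [PySem.List.pyGetD_zero_cons]
  by_cases hgt : 1 < tc.headI
  · rw [if_pos hgt] at hbr
    rw [h0, if_pos hgt, if_pos hgt]
    have hlen : 2 ≤ s.length := hbr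
    obtain ⟨n, hn⟩ : ∃ n, s.length = n + 2 := ⟨s.length - 2, by omega⟩
    have hlm1 : s.length - 1 = n + 1 := by omega
    rw [hlm1, useOneLoop_closed s n (by omega)]
    by_cases h2 : 2 < s.length
    · rw [if_pos h2, costB_closed s (PySem.List.pyGetD s 0 0) (s.length - 2) 2 s.length rfl (by omega) le_rfl]
      have htake : (s.drop 2).take n = (s.drop 2).take (s.length - 2) := by
        congr 1; omega
      rw [htake]
      have : ((s.length - 2 : Nat) : Int) = (n : Int) := by omega
      rw [this]
      ring
    · rw [if_neg h2]
      have hn0 : n = 0 := by omega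
      subst hn0
      simp
  · rw [if_neg hgt] at hbr
    rw [h0, if_neg hgt, if_neg hgt]
    ring
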